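-- pv_equiv track=rewrite | github.com/HuaishengZhong/OJProjects | online3/problem5.py | findManhattanEuclidPair
-- ===== SOURCE A (Python) =====
-- from collections import defaultdict
--
-- def findManhattanEuclidPair(arr, n):
--     X = defaultdict(lambda:0)
--     Y = defaultdict(lambda:0)
--     XY = defaultdict(lambda:0)
--
--     for i in range(0, n):
--         xi = arr[i][0]
--         yi = arr[i][1]
--         X[xi] += 1
--         Y[yi] += 1
--         XY[tuple(arr[i])] += 1
--
--     xAns, yAns, xyAns = 0, 0, 0
--
--     for xCoordinatePair in X:
--         xFrequency = X[xCoordinatePair]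
--         sameXPairs = (xFrequency * (xFrequency - 1)) // 2
--         xAns += sameXPairs
--
--     for yCoordinatePair in Y:
--         yFrequency = Y[yCoordinatePair]
--         sameYPairs = (yFrequency * (yFrequency - 1)) // 2
--         yAns += sameYPairs
--
--     for XYPair in XY:
--         xyFrequency = XY[XYPair]
--         samePointPairs = (xyFrequency * (xyFrequency - 1)) // 2
--         xyAns += samePointPairs
--
--     return (xAns + yAns - xyAns)
-- ===== SOURCE B (Python) =====
-- def _runPairs(vals):
--     # vals must be sorted: sum run*(run-1)//2 over maximal runs of equal values
--     total, run, prev = 0, 0, None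
--     for v in vals:
--         if prev is not None and v == prev:
--             run += 1
--         else:
--             total += run * (run - 1) // 2
--             run, prev = 1, v
--     return total + run * (run - 1) // 2
--
--
-- def findManhattanEuclidPair(arr, n):
--     xs = [arr[i][0] for i in range(n)]
--     ys = [arr[i][1] for i in range(n)]
--     pts = [(arr[i][0], arr[i][1]) for i in range(n)]
--     return _runPairs(sorted(xs)) + _runPairs(sorted(ys)) - _runPairs(sorted(pts))
-- ===== Notes on version B (the rewrite author's own statement) =====
-- stated objective: alternative
-- what changed: Replaces the three hash-frequency dicts (build counts, then a second pass summing f*(f-1)//2 over each dict) by sort-and-sweep: build the three value lists for the first n points, sort each, and sum run*(run-1)//2 over maximal runs of equal consecutive values in one pass.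
import Mathlib
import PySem

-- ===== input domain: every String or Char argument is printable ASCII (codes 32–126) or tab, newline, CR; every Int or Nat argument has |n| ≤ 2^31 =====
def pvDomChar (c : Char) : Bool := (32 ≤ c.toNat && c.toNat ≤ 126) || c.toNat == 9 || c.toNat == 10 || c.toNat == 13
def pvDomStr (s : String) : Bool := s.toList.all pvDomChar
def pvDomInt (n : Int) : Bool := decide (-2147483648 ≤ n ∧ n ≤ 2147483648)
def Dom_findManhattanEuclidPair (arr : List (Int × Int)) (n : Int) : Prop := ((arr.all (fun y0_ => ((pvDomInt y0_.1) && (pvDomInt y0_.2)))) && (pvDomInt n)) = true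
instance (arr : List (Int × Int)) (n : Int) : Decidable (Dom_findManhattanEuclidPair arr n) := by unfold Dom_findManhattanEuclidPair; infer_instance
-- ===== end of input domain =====

-- B replaces A's hash-frequency dicts by sort-and-sweep run counting over the first n points; alternative algorithm of similar cost.


-- ===== PORT A =====
-- literal port: three defaultdict counters built over range(0, n), then three key-loops summing f*(f-1)//2
def findManhattanEuclidPair (arr : List (Int × Int)) (n : Int) : Int :=
  let dicts := (PySem.List.pyRange 0 n 1).foldl
    (fun (st : PySem.Dict Int Int × PySem.Dict Int Int × PySem.Dict (Int × Int) Int) i =>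
      (st.1.insert (PySem.List.pyGetD arr i (0, 0)).1
          (st.1.getD (PySem.List.pyGetD arr i (0, 0)).1 0 + 1),
       st.2.1.insert (PySem.List.pyGetD arr i (0, 0)).2
          (st.2.1.getD (PySem.List.pyGetD arr i (0, 0)).2 0 + 1),
       st.2.2.insert (PySem.List.pyGetD arr i (0, 0))
          (st.2.2.getD (PySem.List.pyGetD arr i (0, 0)) 0 + 1)))
    (PySem.Dict.empty, PySem.Dict.empty, PySem.Dict.empty)
  let xAns := dicts.1.keys.foldl
    (fun acc k => acc + PySem.Int.floordiv (dicts.1.getD k 0 * (dicts.1.getD k 0 - 1)) 2) 0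
  let yAns := dicts.2.1.keys.foldl
    (fun acc k => acc + PySem.Int.floordiv (dicts.2.1.getD k 0 * (dicts.2.1.getD k 0 - 1)) 2) 0
  let xyAns := dicts.2.2.keys.foldl
    (fun acc k => acc + PySem.Int.floordiv (dicts.2.2.getD k 0 * (dicts.2.2.getD k 0 - 1)) 2) 0
  xAns + yAns - xyAns

-- ===== PORT B =====
-- B-side helpers (mirror Source B's _runPairs: one sweep over a sorted list, closing each run of equal values)
def pvHalfPairs (c : Int) : Int := PySem.Int.floordiv (c * (c - 1)) 2

def pvRunStep {α : Type} [BEq α] (st : Int × Int × Option α) (v : α) : Int × Int × Option α :=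
  match st.2.2 with
  | some p => if v == p then (st.1, st.2.1 + 1, some p)
              else (st.1 + pvHalfPairs st.2.1, 1, some v)
  | none => (st.1 + pvHalfPairs st.2.1, 1, some v)

def pvRunSum {α : Type} [BEq α] (vals : List α) : Int :=
  let st := vals.foldl pvRunStep (0, 0, none)
  st.1 + pvHalfPairs st.2.1

def findManhattanEuclidPair_alt (arr : List (Int × Int)) (n : Int) : Int :=
  let xs := (PySem.List.pyRange 0 n 1).map (fun i => (PySem.List.pyGetD arr i (0, 0)).1)
  let ys := (PySem.List.pyRange 0 n 1).map (fun i => (PySem.List.pyGetD arr i (0, 0)).2)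
  let pts := (PySem.List.pyRange 0 n 1).map (fun i => PySem.List.pyGetD arr i (0, 0))
  -- sorted(pts) on tuples is Python's lexicographic tuple sort = PySem.List.sorted2 with the two components
  pvRunSum (PySem.List.sorted xs (fun v => v)) + pvRunSum (PySem.List.sorted ys (fun v => v))
    - pvRunSum (PySem.List.sorted2 pts (fun p => p.1) (fun p => p.2))

-- ===== PRECONDITION & SPEC =====
-- Pre_ excludes exactly the inputs where A raises IndexError (arr[i] with n exceeding len(arr)); A returns on all others.
def Pre_findManhattanEuclidPair (arr : List (Int × Int)) (n : Int) : Prop := n ≤ (arr.length : Int)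
instance (arr : List (Int × Int)) (n : Int) : Decidable (Pre_findManhattanEuclidPair arr n) := by
  unfold Pre_findManhattanEuclidPair; infer_instance

def pvWitness_findManhattanEuclidPair : (List (Int × Int)) × Int := ([(0, 0), (0, 1), (1, 0), (0, 0)], 4)

def Spec_findManhattanEuclidPair (arr : List (Int × Int)) (n : Int) (out : Int) : Prop := out = findManhattanEuclidPair_alt arr n
instance (arr : List (Int × Int)) (n : Int) (out : Int) : Decidable (Spec_findManhattanEuclidPair arr n out) := by unfold Spec_findManhattanEuclidPair; infer_instance

-- ===== CLAIM (what is proved, stated in full; the proofs are below) =====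
def Claim_equal_findManhattanEuclidPair : Prop := ∀ (arr : List (Int × Int)) (n : Int), Dom_findManhattanEuclidPair arr n → Pre_findManhattanEuclidPair arr n → Spec_findManhattanEuclidPair arr n (findManhattanEuclidPair arr n)

-- ===== LEMMAS AND PROOFS =====

-- the common value both programs compute, per coordinate list: sum of C(multiplicity, 2)
def pvPairsOf {α : Type} [BEq α] [DecidableEq α] (l : List α) : Int :=
  ∑ x ∈ l.toFinset, pvHalfPairs ((l.count x : Int))

-- the first-n prefix: indexing loops over range(0, n) are loops over arr.take n.toNat
lemma pv_map_range_getD (arr : List (Int × Int)) (n : Int) (h : n ≤ (arr.length : Int)) :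
    (PySem.List.pyRange 0 n 1).map (fun i => PySem.List.pyGetD arr i (0, 0))
      = arr.take n.toNat := by
  rcases Int.lt_or_le n 0 with hn | hn
  · rw [PySem.List.pyRange_one_eq_nil (by omega)]
    have h0 : n.toNat = 0 := by omega
    simp [h0]
  · obtain ⟨pref, hpref⟩ : ∃ p, p = arr.take n.toNat := ⟨_, rfl⟩
    have hlen : pref.length = n.toNat := by
      rw [hpref, List.length_take]; omega
    have hcast : (pref.length : Int) = n := by rw [hlen]; omega
    have hmap : (PySem.List.pyRange 0 n 1).map (fun i => PySem.List.pyGetD arr i (0, 0))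
        = (PySem.List.pyRange 0 n 1).map (fun i => PySem.List.pyGetD pref i (0, 0)) := by
      apply List.map_congr_left
      intro i hi
      rw [PySem.List.mem_pyRange_one] at hi
      rw [PySem.List.pyGetD_eq_getElem arr (0, 0) hi.1 (by omega),
          PySem.List.pyGetD_eq_getElem pref (0, 0) hi.1 (by rw [hcast]; exact hi.2)]
      simp only [hpref]
      exact (List.getElem_take).symm
    rw [hmap, ← hpref, ← hcast]
    exact PySem.List.map_pyGetD_pyRange_zero' pref (0, 0)

lemma pv_foldl_range_getD {β : Type} (arr : List (Int × Int)) (n : Int) (h : n ≤ (arr.length : Int))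
    (F : β → (Int × Int) → β) (init : β) :
    (PySem.List.pyRange 0 n 1).foldl (fun st i => F st (PySem.List.pyGetD arr i (0, 0))) init
      = (arr.take n.toNat).foldl F init := by
  rw [show (fun (st : β) (i : Int) => F st (PySem.List.pyGetD arr i (0, 0)))
        = fun st i => F st ((fun j => PySem.List.pyGetD arr j (0, 0)) i) from rfl,
      ← List.foldl_map, pv_map_range_getD arr n h]

-- A-side: the key-loop over a counter of l sums C(count, 2) over the distinct values of l
lemma pv_keysum_counter {κ : Type} [BEq κ] [LawfulBEq κ] [DecidableEq κ] (l : List κ) :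
    (PySem.Dict.counter l).keys.foldl
      (fun acc k => acc + PySem.Int.floordiv ((PySem.Dict.counter l).getD k 0 * ((PySem.Dict.counter l).getD k 0 - 1)) 2) 0
      = pvPairsOf l := by
  simp only [PySem.Dict.getD_counter, PySem.Dict.keys_counter]
  rw [PySem.List.foldl_add (PySem.Set.ofList l)
        (fun k => PySem.Int.floordiv ((l.count k : Int) * ((l.count k : Int) - 1)) 2) 0]
  have hnd : (PySem.Set.ofList l).Nodup := PySem.Set.nodup_ofList l
  have hfs : (PySem.Set.ofList l).toFinset = l.toFinset := by
    ext x; simp [PySem.Set.mem_ofList, List.mem_toFinset]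
  rw [← List.sum_toFinset _ hnd, hfs]
  unfold pvPairsOf pvHalfPairs
  simp

-- B-side: sweeping a list whose order groups equal elements (Pairwise R, R antisymmetric) yields pvPairsOf
lemma pv_runsum_invariant {α : Type} [BEq α] [LawfulBEq α] [DecidableEq α] (R : α → α → Prop)
    (hanti : ∀ a b, R a b → R b a → a = b) :
    ∀ (s : List α) (t k : Int) (v : α), s.Pairwise R → (∀ x ∈ s, R v x) →
      ((s.foldl pvRunStep (t, k, some v)).1 + pvHalfPairs (s.foldl pvRunStep (t, k, some v)).2.1)
        = t + pvHalfPairs (k + (s.count v : Int)) + ∑ x ∈ s.toFinset.erase v, pvHalfPairs ((s.count x : Int)) := by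
  intro s
  induction s with
  | nil =>
    intro t k v _ _
    simp [pvHalfPairs]
  | cons a rest ih =>
    intro t k v hp hv
    rw [List.pairwise_cons] at hp
    obtain ⟨hhead, htail⟩ := hp
    by_cases hav : a = v
    · subst hav
      have hstep : pvRunStep (t, k, some a) a = (t, k + 1, some a) := by
        simp [pvRunStep]
      rw [List.foldl_cons, hstep, ih t (k + 1) a htail hhead]
      have hcnt : k + 1 + (rest.count a : Int) = k + ((a :: rest).count a : Int) := by
        rw [List.count_cons_self]; push_cast; ring
      have hset : (a :: rest).toFinset.erase a = rest.toFinset.erase a := by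
        rw [List.toFinset_cons, Finset.erase_insert_eq_erase]
      rw [hcnt, hset]
      congr 1
      apply Finset.sum_congr rfl
      intro x hx
      have hxa : x ≠ a := Finset.ne_of_mem_erase hx
      simp [hxa.symm]
    · have hbeq : (a == v) = false := by simp [hav]
      have hstep : pvRunStep (t, k, some v) a = (t + pvHalfPairs k, 1, some a) := by
        simp [pvRunStep, hbeq]
      have hvnot : v ∉ a :: rest := by
        intro hmem
        rcases List.mem_cons.mp hmem with rfl | hmem'
        · exact hav rfl
        · exact hav (hanti a v (hhead v hmem') (hv a (List.mem_cons_self)))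
      rw [List.foldl_cons, hstep, ih (t + pvHalfPairs k) 1 a htail hhead]
      have hcv : ((a :: rest).count v : Int) = 0 := by
        rw [List.count_eq_zero_of_not_mem hvnot]; rfl
      have herase : (a :: rest).toFinset.erase v = (a :: rest).toFinset := by
        apply Finset.erase_eq_of_notMem
        simp only [List.mem_toFinset]
        exact hvnot
      rw [hcv, herase, add_zero]
      have hsplit : ∑ x ∈ (a :: rest).toFinset, pvHalfPairs (((a :: rest).count x : Int))
          = pvHalfPairs (((a :: rest).count a : Int))
            + ∑ x ∈ rest.toFinset.erase a, pvHalfPairs (((a :: rest).count x : Int)) := by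
        rw [List.toFinset_cons, ← Finset.add_sum_erase _ _ (Finset.mem_insert_self a _),
            Finset.erase_insert_eq_erase]
      rw [hsplit]
      have hca : (((a :: rest).count a : Nat) : Int) = 1 + (rest.count a : Int) := by
        rw [List.count_cons_self]; push_cast; ring
      rw [hca]
      have hsum : ∑ x ∈ rest.toFinset.erase a, pvHalfPairs (((a :: rest).count x : Int))
          = ∑ x ∈ rest.toFinset.erase a, pvHalfPairs ((rest.count x : Int)) := by
        apply Finset.sum_congr rfl
        intro x hx
        have hxa : x ≠ a := Finset.ne_of_mem_erase hx
        simp [hxa.symm]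
      rw [hsum]
      ring

lemma pv_runsum_pairwise {α : Type} [BEq α] [LawfulBEq α] [DecidableEq α] (R : α → α → Prop)
    (hanti : ∀ a b, R a b → R b a → a = b) (s : List α) (hp : s.Pairwise R) :
    pvRunSum s = pvPairsOf s := by
  cases s with
  | nil => simp [pvRunSum, pvPairsOf, pvHalfPairs, PySem.Int.floordiv]
  | cons a rest =>
    rw [List.pairwise_cons] at hp
    obtain ⟨hhead, htail⟩ := hp
    unfold pvRunSum
    have hstep : pvRunStep ((0 : Int), (0 : Int), (none : Option α)) a
        = (0 + pvHalfPairs 0, 1, some a) := by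
      simp [pvRunStep]
    have h0 : pvHalfPairs 0 = 0 := by simp [pvHalfPairs, PySem.Int.floordiv]
    rw [List.foldl_cons, hstep, h0, add_zero,
        pv_runsum_invariant R hanti rest 0 1 a htail hhead]
    unfold pvPairsOf
    have hsplit : ∑ x ∈ (a :: rest).toFinset, pvHalfPairs (((a :: rest).count x : Int))
        = pvHalfPairs (((a :: rest).count a : Int))
          + ∑ x ∈ rest.toFinset.erase a, pvHalfPairs (((a :: rest).count x : Int)) := by
      rw [List.toFinset_cons, ← Finset.add_sum_erase _ _ (Finset.mem_insert_self a _),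
          Finset.erase_insert_eq_erase]
    rw [hsplit]
    have hca : (((a :: rest).count a : Nat) : Int) = 1 + (rest.count a : Int) := by
      rw [List.count_cons_self]; push_cast; ring
    rw [hca]
    have hsum : ∑ x ∈ rest.toFinset.erase a, pvHalfPairs (((a :: rest).count x : Int))
        = ∑ x ∈ rest.toFinset.erase a, pvHalfPairs ((rest.count x : Int)) := by
      apply Finset.sum_congr rfl
      intro x hx
      have hxa : x ≠ a := Finset.ne_of_mem_erase hx
      simp [hxa.symm]
    rw [hsum]
    ring

lemma pv_pairsOf_perm {α : Type} [BEq α] [LawfulBEq α] [DecidableEq α] {l l' : List α}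
    (h : l.Perm l') : pvPairsOf l = pvPairsOf l' := by
  unfold pvPairsOf
  rw [List.toFinset_eq_of_perm l l' h]
  exact Finset.sum_congr rfl (fun x _ => by rw [h.count_eq])

-- insertion sort keeps "no later element strictly before an earlier one"
lemma pv_pairwise_insertBy {α : Type} (before : α → α → Bool)
    (htr : ∀ a b c, before a b = true → before b c = true → before a c = true)
    (hirr : ∀ a, before a a = false)
    (x : α) (l : List α) (h : l.Pairwise (fun a b => before b a = false)) :
    (PySem.List.insertBy before x l).Pairwise (fun a b => before b a = false) := by
  have hasym : ∀ a b, before a b = true → before b a = false := by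
    intro a b hab
    by_contra hc
    rw [Bool.not_eq_false] at hc
    exact absurd (htr a b a hab hc) (by simp [hirr a])
  induction l with
  | nil => simp [PySem.List.insertBy]
  | cons y ys ih =>
    rw [List.pairwise_cons] at h
    obtain ⟨hy, hys⟩ := h
    by_cases hb : before x y = true
    · rw [show PySem.List.insertBy before x (y :: ys) = x :: y :: ys from by
        simp [PySem.List.insertBy, hb]]
      refine List.pairwise_cons.mpr ⟨?_, List.pairwise_cons.mpr ⟨hy, hys⟩⟩
      intro z hz
      rcases List.mem_cons.mp hz with rfl | hz'
      · exact hasym x z hb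
      · by_contra hc
        rw [Bool.not_eq_false] at hc
        exact absurd (htr z x y hc hb) (by simp [hy z hz'])
    · rw [show PySem.List.insertBy before x (y :: ys) = y :: PySem.List.insertBy before x ys from by
        simp [PySem.List.insertBy, hb]]
      refine List.pairwise_cons.mpr ⟨?_, ih hys⟩
      intro z hz
      rcases (PySem.List.mem_insertBy before x z ys).mp hz with rfl | hz'
      · simpa using hb
      · exact hy z hz' 

lemma pv_pairwise_foldl_insertBy {α : Type} (before : α → α → Bool)
    (htr : ∀ a b c, before a b = true → before b c = true → before a c = true)
    (hirr : ∀ a, before a a = false) (l : List α) :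
    (l.foldl (fun acc x => PySem.List.insertBy before x acc) []).Pairwise
      (fun a b => before b a = false) := by
  suffices hgen : ∀ (l : List α) (acc : List α),
      acc.Pairwise (fun a b => before b a = false) →
      (l.foldl (fun acc x => PySem.List.insertBy before x acc) acc).Pairwise
        (fun a b => before b a = false) by
    exact hgen l [] (by simp)
  intro l
  induction l with
  | nil => intro acc h; simpa using h
  | cons x xs ih =>
    intro acc h
    rw [List.foldl_cons]
    exact ih _ (pv_pairwise_insertBy before htr hirr x acc h)

-- the lexicographic order sorted2 produces on pairs of Ints
def pvLexLe (a b : Int × Int) : Prop :=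
  (decide (b.1 < a.1) || !decide (a.1 < b.1) && decide (b.2 < a.2)) = false

lemma pv_sorted2_pairwise (l : List (Int × Int)) :
    (PySem.List.sorted2 l (fun p => p.1) (fun p => p.2)).Pairwise pvLexLe := by
  unfold PySem.List.sorted2
  simp only [if_neg (by decide : ¬ (false = true))]
  exact pv_pairwise_foldl_insertBy _
    (by
      intro a b c h1 h2
      simp only [Bool.or_eq_true, Bool.and_eq_true, Bool.not_eq_true', decide_eq_true_eq,
        decide_eq_false_iff_not, not_lt] at h1 h2 ⊢
      omega)
    (by
      intro a
      simp only [Bool.or_eq_false_iff, Bool.and_eq_false_iff, decide_eq_false_iff_not, not_lt,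
        Bool.not_eq_false', decide_eq_true_eq]
      omega) l

lemma pv_lexle_antisymm : ∀ a b : Int × Int, pvLexLe a b → pvLexLe b a → a = b := by
  intro a b hab hba
  unfold pvLexLe at hab hba
  simp only [Bool.or_eq_false_iff, Bool.and_eq_false_iff, decide_eq_false_iff_not, not_lt,
    Bool.not_eq_false', decide_eq_true_eq] at hab hba
  obtain ⟨a1, a2⟩ := a; obtain ⟨b1, b2⟩ := b
  simp_all only [Prod.mk.injEq]
  omega

lemma pv_map_range_getD_f {β : Type} (arr : List (Int × Int)) (n : Int)
    (h : n ≤ (arr.length : Int)) (f : (Int × Int) → β) :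
    (PySem.List.pyRange 0 n 1).map (fun i => f (PySem.List.pyGetD arr i (0, 0)))
      = (arr.take n.toNat).map f := by
  rw [show (fun i => f (PySem.List.pyGetD arr i (0, 0)))
        = f ∘ (fun i => PySem.List.pyGetD arr i (0, 0)) from rfl,
      ← List.map_map, pv_map_range_getD arr n h]

lemma pv_A_eval (arr : List (Int × Int)) (n : Int) (h : n ≤ (arr.length : Int)) :
    findManhattanEuclidPair arr n
      = pvPairsOf ((arr.take n.toNat).map (fun p => p.1))
        + pvPairsOf ((arr.take n.toNat).map (fun p => p.2))
        - pvPairsOf (arr.take n.toNat) := by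
  unfold findManhattanEuclidPair
  rw [pv_foldl_range_getD arr n h
        (F := fun (st : PySem.Dict Int Int × PySem.Dict Int Int × PySem.Dict (Int × Int) Int) p =>
          (st.1.insert p.1 (st.1.getD p.1 0 + 1),
           st.2.1.insert p.2 (st.2.1.getD p.2 0 + 1),
           st.2.2.insert p (st.2.2.getD p 0 + 1)))]
  rw [PySem.List.foldl_prod_mk
        (f := fun (d : PySem.Dict Int Int) (p : Int × Int) => d.insert p.1 (d.getD p.1 0 + 1))
        (g := fun (s : PySem.Dict Int Int × PySem.Dict (Int × Int) Int) (p : Int × Int) =>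
          (s.1.insert p.2 (s.1.getD p.2 0 + 1), s.2.insert p (s.2.getD p 0 + 1)))]
  rw [PySem.List.foldl_prod_mk
        (f := fun (d : PySem.Dict Int Int) (p : Int × Int) => d.insert p.2 (d.getD p.2 0 + 1))
        (g := fun (d : PySem.Dict (Int × Int) Int) (p : Int × Int) => d.insert p (d.getD p 0 + 1))]
  have hx : (arr.take n.toNat).foldl
      (fun (d : PySem.Dict Int Int) (p : Int × Int) => d.insert p.1 (d.getD p.1 0 + 1))
      PySem.Dict.empty = PySem.Dict.counter ((arr.take n.toNat).map (fun p => p.1)) := by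
    rw [← PySem.Dict.foldl_insert_getD_add_one_eq_counter, List.foldl_map]
  have hy : (arr.take n.toNat).foldl
      (fun (d : PySem.Dict Int Int) (p : Int × Int) => d.insert p.2 (d.getD p.2 0 + 1))
      PySem.Dict.empty = PySem.Dict.counter ((arr.take n.toNat).map (fun p => p.2)) := by
    rw [← PySem.Dict.foldl_insert_getD_add_one_eq_counter, List.foldl_map]
  have hxy : (arr.take n.toNat).foldl
      (fun (d : PySem.Dict (Int × Int) Int) (p : Int × Int) => d.insert p (d.getD p 0 + 1))
      PySem.Dict.empty = PySem.Dict.counter (arr.take n.toNat) :=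
    PySem.Dict.foldl_insert_getD_add_one_eq_counter _
  rw [hx, hy, hxy]
  simp only [pv_keysum_counter]

lemma pv_runsum_sorted_int (l : List Int) :
    pvRunSum (PySem.List.sorted l (fun v => v)) = pvPairsOf l := by
  rw [pv_runsum_pairwise (fun a b : Int => a ≤ b) (fun a b h1 h2 => le_antisymm h1 h2)
        (PySem.List.sorted l (fun v => v)) (PySem.List.sorted_pairwise l (fun v => v))]
  exact pv_pairsOf_perm (PySem.List.sorted_perm l (fun v => v) false)

lemma pv_runsum_sorted2_pairs (l : List (Int × Int)) :
    pvRunSum (PySem.List.sorted2 l (fun p => p.1) (fun p => p.2)) = pvPairsOf l := by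
  rw [pv_runsum_pairwise pvLexLe pv_lexle_antisymm
        (PySem.List.sorted2 l (fun p => p.1) (fun p => p.2)) (pv_sorted2_pairwise l)]
  exact pv_pairsOf_perm (PySem.List.sorted2_perm l (fun p => p.1) (fun p => p.2) false)

lemma pv_B_eval (arr : List (Int × Int)) (n : Int) (h : n ≤ (arr.length : Int)) :
    findManhattanEuclidPair_alt arr n
      = pvPairsOf ((arr.take n.toNat).map (fun p => p.1))
        + pvPairsOf ((arr.take n.toNat).map (fun p => p.2))
        - pvPairsOf (arr.take n.toNat) := by
  unfold findManhattanEuclidPair_alt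
  simp only [pv_map_range_getD_f arr n h, pv_map_range_getD arr n h,
    pv_runsum_sorted_int, pv_runsum_sorted2_pairs]

-- ===== VERDICT (by name: the statement is the Claim_ definition above) =====
theorem findManhattanEuclidPair_spec : Claim_equal_findManhattanEuclidPair := by
  intro arr n _ hpre
  unfold Spec_findManhattanEuclidPair
  unfold Pre_findManhattanEuclidPair at hpre
  rw [pv_A_eval arr n hpre, pv_B_eval arr n hpre]
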